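-- pv_equiv track=rewrite | github.com/mindle714/tf-models | jb-aug/view_model.py | _compute_fans
-- ===== SOURCE A (Python) =====
-- def _compute_fans(shape):
--   """Computes the number of input and output units for a weight shape.
--
--   Args:
--     shape: Integer shape tuple or TF tensor shape.
--
--   Returns:
--     A tuple of integer scalars (fan_in, fan_out).
--   """
--   if len(shape) < 1:  # Just to avoid errors for constants.
--     fan_in = fan_out = 1
--   elif len(shape) == 1:
--     fan_in = fan_out = shape[0]
--   elif len(shape) == 2:
--     fan_in = shape[0]
--     fan_out = shape[1]
--   else:
--     # Assuming convolution kernels (2D, 3D, or more).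
--     # kernel shape: (..., input_depth, depth)
--     receptive_field_size = 1
--     for dim in shape[:-2]:
--       receptive_field_size *= dim
--     fan_in = shape[-2] * receptive_field_size
--     fan_out = shape[-1] * receptive_field_size
--   return int(fan_in), int(fan_out)
-- ===== SOURCE B (Python) =====
-- def _compute_fans(shape):
--   # One online pass with a sliding state: p2 = prod of dims except the last
--   # two seen so far, p1 = prod of dims except the last, last = last dim.
--   p2, p1, last, n = 1, 1, 1, 0
--   for dim in shape:
--     p2, p1, last = p1, p1 * last, dim
--     n += 1
--   if n == 0:
--     return 1, 1
--   if n == 1: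
--     return int(last), int(last)
--   return int(p1), int(p2 * last)
-- ===== Notes on version B (the rewrite author's own statement) =====
-- stated objective: alternative
-- what changed: Replaced A's branch-per-rank structure (slice-based indexing plus an explicit receptive-field product loop over shape[:-2]) with a single online left-to-right pass maintaining a sliding state (prod of all-but-last-two, prod of all-but-last, last dim); the final branches only select state components.
import Mathlib
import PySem

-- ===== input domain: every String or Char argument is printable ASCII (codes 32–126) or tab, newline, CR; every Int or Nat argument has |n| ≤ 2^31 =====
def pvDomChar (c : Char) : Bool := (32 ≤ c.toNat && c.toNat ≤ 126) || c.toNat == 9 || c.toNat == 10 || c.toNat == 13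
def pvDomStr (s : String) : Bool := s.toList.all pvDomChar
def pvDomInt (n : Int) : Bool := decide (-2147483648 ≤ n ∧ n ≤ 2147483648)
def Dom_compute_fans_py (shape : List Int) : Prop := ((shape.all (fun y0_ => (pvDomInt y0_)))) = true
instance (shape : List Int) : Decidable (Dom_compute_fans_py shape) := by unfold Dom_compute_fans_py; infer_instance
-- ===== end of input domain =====

-- B replaces A's branch-per-rank slicing/loop with one online pass over the dims keeping a sliding state (alternative decomposition; same cost).


-- ===== PORT A =====
-- Literal transliteration of A: four length branches; the last keeps the
-- explicit accumulator loop over shape[:-2]. All indices are in range in their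
-- branch, so pyGetD with default 0 is exact.
def compute_fans_py (shape : List Int) : Int × Int :=
  if shape.length < 1 then (1, 1)
  else if shape.length = 1 then
    let v := PySem.List.pyGetD shape 0 0
    (v, v)
  else if shape.length = 2 then
    (PySem.List.pyGetD shape 0 0, PySem.List.pyGetD shape 1 0)
  else
    let receptive_field_size :=
      (PySem.List.slice shape none (some (-2))).foldl (fun acc dim => acc * dim) 1
    (PySem.List.pyGetD shape (-2) 0 * receptive_field_size,
     PySem.List.pyGetD shape (-1) 0 * receptive_field_size)

-- ===== PORT B =====
-- Literal transliteration of B: one fold over the dims with state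
-- (p2, p1, last, n), then branches that only select state components.
def compute_fans_py_alt (shape : List Int) : Int × Int :=
  let s := shape.foldl
    (fun (s : Int × Int × Int × Int) dim => (s.2.1, s.2.1 * s.2.2.1, dim, s.2.2.2 + 1))
    (1, 1, 1, 0)
  if s.2.2.2 = 0 then (1, 1)
  else if s.2.2.2 = 1 then (s.2.2.1, s.2.2.1)
  else (s.2.1, s.1 * s.2.2.1)

-- ===== PRECONDITION & SPEC =====
def Spec_compute_fans_py (shape : List Int) (out : Int × Int) : Prop := out = compute_fans_py_alt shape
instance (shape : List Int) (out : Int × Int) : Decidable (Spec_compute_fans_py shape out) := by unfold Spec_compute_fans_py; infer_instance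

-- ===== CLAIM (what is proved, stated in full; the proofs are below) =====
def Claim_equal_compute_fans_py : Prop := ∀ (shape : List Int), Dom_compute_fans_py shape → Spec_compute_fans_py shape (compute_fans_py shape)

-- ===== LEMMAS AND PROOFS =====

-- Characterisation of B's fold state.
lemma fold_state_eq (xs : List Int) :
    xs.foldl
      (fun (s : Int × Int × Int × Int) dim => (s.2.1, s.2.1 * s.2.2.1, dim, s.2.2.2 + 1))
      (1, 1, 1, 0)
      = ((xs.take (xs.length - 2)).prod, (xs.take (xs.length - 1)).prod,
         xs.getLastD 1, (xs.length : Int)) := by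
  induction xs using List.reverseRecOn with
  | nil => simp
  | append_singleton xs d ih =>
      rw [List.foldl_append, ih, List.foldl_cons, List.foldl_nil]
      by_cases hne : xs = []
      · subst hne; norm_num [List.getLastD]
      · have hpos : 1 ≤ xs.length := List.length_pos_iff.mpr hne
        have hsplit : (xs.take (xs.length - 1)).prod * xs.getLastD 1 = xs.prod := by
          conv_rhs => rw [← List.dropLast_append_getLast hne]
          rw [List.prod_append, List.dropLast_eq_take, List.prod_singleton,
              List.getLastD_eq_getLast?, List.getLast?_eq_getLast_of_ne_nil hne, Option.getD_some]
        have e2 : xs.length + 1 - 2 = xs.length - 1 := by omega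
        have e1 : xs.length + 1 - 1 = xs.length := by omega
        rw [List.length_append, List.length_singleton, e2, e1,
            List.take_append_of_le_length (by omega),
            List.take_append_of_le_length (le_refl _),
            List.take_length, List.getLastD_concat]
        simp only [Prod.mk.injEq]
        refine ⟨?_, ?_, ?_, ?_⟩ <;> trivial

-- prod of xs[:-1] splits as prod of xs[:-2] times xs[-2], for length ≥ 2.
lemma prod_take_pred (xs : List Int) (h : 2 ≤ xs.length) :
    (xs.take (xs.length - 1)).prod =
      (xs.take (xs.length - 2)).prod * xs[xs.length - 2]'(by omega) := by
  have h1 : xs.length - 1 = (xs.length - 2) + 1 := by omega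
  rw [h1]
  exact List.prod_take_succ xs (xs.length - 2) (by omega)

-- A's accumulator loop is the list product.
lemma foldl_mul_eq_prod (xs : List Int) (a : Int) :
    xs.foldl (fun acc dim => acc * dim) a = a * xs.prod := by
  induction xs generalizing a with
  | nil => simp
  | cons x xs ih => simp [List.foldl, ih, mul_assoc]

-- ===== VERDICT (by name: the statement is the Claim_ definition above) =====
theorem compute_fans_py_spec : Claim_equal_compute_fans_py := by
  intro shape _
  unfold Spec_compute_fans_py compute_fans_py compute_fans_py_alt
  rw [fold_state_eq]
  by_cases h0 : shape.length < 1
  · obtain rfl : shape = [] := List.length_eq_zero_iff.mp (by omega)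
    decide
  · by_cases h1 : shape.length = 1
    · obtain ⟨a, rfl⟩ := List.length_eq_one_iff.mp h1
      norm_num [PySem.List.pyGetD, PySem.List.pyIdx?, PySem.List.pyGet?, List.getLastD]
    · have hlen : 2 ≤ shape.length := by omega
      by_cases h2 : shape.length = 2
      · obtain ⟨a, b, rfl⟩ := List.length_eq_two.mp h2
        norm_num [PySem.List.pyGetD, PySem.List.pyIdx?, PySem.List.pyGet?, List.getLastD]
      · simp only [h0, h1, h2, reduceIte]
        have hn0 : (shape.length : Int) ≠ 0 := by
          intro h; omega
        have hn1 : (shape.length : Int) ≠ 1 := by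
          intro h; omega
        simp only [hn0, hn1, if_false]
        rw [PySem.List.slice_to_neg_ofNat shape 2 (by omega),
            PySem.List.pyGetD_neg_ofNat shape 1 0 (by omega) (by omega),
            PySem.List.pyGetD_neg_ofNat shape 2 0 (by omega) (by omega),
            foldl_mul_eq_prod]
        rw [prod_take_pred shape hlen]
        have hlast : shape.getLastD 1 = shape[shape.length - 1]'(by omega) := by
          rcases shape.eq_nil_or_concat with rfl | ⟨ys, y, rfl⟩
          · simp at hlen
          · simp [List.length_append]
        rw [hlast]
        simp only [Prod.mk.injEq]
        constructor <;> ring
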